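-- pv_equiv track=rewrite | github.com/Saadmomin2903/voice-bot | fasthtml_frontend/utils/websocket_relay.py | _extract_complete_sentence
-- ===== SOURCE A (Python) =====
-- from typing import Dict, Any, Optional
--
-- def _extract_complete_sentence(text: str) -> Optional[str]:
--     """Extract complete sentence from text buffer"""
--     sentence_endings = ['.', '!', '?', ';']
--     last_sentence_end = -1
--
--     for ending in sentence_endings:
--         pos = text.rfind(ending)
--         if pos > last_sentence_end:
--             last_sentence_end = pos
--
--     if last_sentence_end > 0:
--         sentence = text[:last_sentence_end + 1].strip()
--         # Only return if sentence is substantial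
--         if len(sentence) > 10:
--             return sentence
--
--     return None
-- ===== SOURCE B (Python) =====
-- from typing import Optional
--
-- def _extract_complete_sentence(text: str) -> Optional[str]:
--     """Extract complete sentence from text buffer: one forward pass tracking
--     the last terminator index instead of four full rfind scans."""
--     idx = -1
--     for i, ch in enumerate(text):
--         if ch in '.!?;':
--             idx = i
--     if idx > 0:
--         sentence = text[:idx + 1].strip()
--         if len(sentence) > 10:
--             return sentence
--     return None
-- ===== Notes on version B (the rewrite author's own statement) =====
-- stated objective: simpler
-- what changed: Replaces the four separate full rfind scans (one per terminator) with a single forward pass over the characters that tracks the last terminator index; the strip/length tail logic is unchanged.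
import Mathlib
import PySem

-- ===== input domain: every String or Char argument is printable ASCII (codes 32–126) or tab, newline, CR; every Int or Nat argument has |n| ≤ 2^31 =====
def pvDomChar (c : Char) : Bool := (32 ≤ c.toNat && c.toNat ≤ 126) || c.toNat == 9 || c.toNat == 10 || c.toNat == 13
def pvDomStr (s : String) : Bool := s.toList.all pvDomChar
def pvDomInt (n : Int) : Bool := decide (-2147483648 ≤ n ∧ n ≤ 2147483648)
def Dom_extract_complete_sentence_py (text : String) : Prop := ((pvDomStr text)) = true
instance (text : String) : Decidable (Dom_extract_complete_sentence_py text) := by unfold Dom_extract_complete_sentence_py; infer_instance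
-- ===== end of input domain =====

-- B replaces A's four separate full rfind scans by a single forward pass tracking the last
-- terminator index (objective: simpler); the strip/length tail logic is unchanged.

-- ===== PORT A =====
def extract_complete_sentence_py (text : String) : Option String :=
  let sentence_endings : List String := [".", "!", "?", ";"]
  let last_sentence_end : Int :=
    sentence_endings.foldl (fun acc ending =>
      let pos := PySem.Str.rfind text ending
      if pos > acc then pos else acc) (-1)
  if last_sentence_end > 0 then
    let sentence := PySem.Str.strip (PySem.Str.slice text none (some (last_sentence_end + 1)))
    if (PySem.Str.len sentence : Int) > 10 then some sentence else none
  else none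

-- ===== PORT B =====
def extract_complete_sentence_py_alt (text : String) : Option String :=
  let idx : Int := (PySem.List.enumerate text.toList).foldl
      (fun acc p => if PySem.Chars.isIn [p.2] ['.', '!', '?', ';'] then p.1 else acc) (-1)
  if idx > 0 then
    let sentence := PySem.Str.strip (PySem.Str.slice text none (some (idx + 1)))
    if (PySem.Str.len sentence : Int) > 10 then some sentence else none
  else none

-- ===== PRECONDITION & SPEC =====
def Spec_extract_complete_sentence_py (text : String) (out : Option String) : Prop := out = extract_complete_sentence_py_alt text
instance (text : String) (out : Option String) : Decidable (Spec_extract_complete_sentence_py text out) := by unfold Spec_extract_complete_sentence_py; infer_instance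

-- ===== CLAIM (what is proved, stated in full; the proofs are below) =====
def Claim_equal_extract_complete_sentence_py : Prop := ∀ (text : String), Dom_extract_complete_sentence_py text → Spec_extract_complete_sentence_py text (extract_complete_sentence_py text)

-- ===== LEMMAS AND PROOFS =====

theorem pv_isIn_single (c : Char) (l : List Char) : PySem.Chars.isIn [c] l = l.contains c := by
  rcases h : l.contains c with _|_
  · rw [PySem.Chars.isIn_eq_false_iff]
    intro hinf
    have := hinf.sublist.subset (List.mem_singleton_self c)
    simp [List.contains_eq_mem] at h; exact h this
  · rw [PySem.Chars.isIn_iff_infix]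
    simp only [List.contains_eq_mem, decide_eq_true_eq] at h
    obtain ⟨s, t, rfl⟩ := List.mem_iff_append.mp h
    exact ⟨s, t, by simp⟩

theorem pv_go_le (s : List Char) (d : Char) (k : Nat) : PySem.Chars.rfind.go s [d] k ≤ (k : Int) := by
  induction k with
  | zero => rw [PySem.Chars.rfind.go]; split <;> omega
  | succ j ih => rw [PySem.Chars.rfind.go]; split <;> omega

theorem pv_rfind_lt (cs : List Char) (d : Char) :
    PySem.Chars.rfind cs [d] < (cs.length : Int) := by
  unfold PySem.Chars.rfind
  cases h : cs.length with
  | zero =>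
    have : cs = [] := List.length_eq_zero_iff.mp h
    subst this
    rw [PySem.Chars.rfind.go]
    simp [List.isPrefixOf]
  | succ m =>
    rw [PySem.Chars.rfind.go]
    have hdrop : List.drop (m + 1) cs = [] := List.drop_eq_nil_of_le (by omega)
    rw [hdrop]
    have := pv_go_le cs d m
    simp only [List.isPrefixOf, Bool.false_eq_true, if_false]
    omega

theorem pv_go_append (cs : List Char) (c d : Char) (k : Nat) (hk : k < cs.length) :
    PySem.Chars.rfind.go (cs ++ [c]) [d] k = PySem.Chars.rfind.go cs [d] k := by
  induction k with
  | zero =>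
    rw [PySem.Chars.rfind.go, PySem.Chars.rfind.go]
    cases cs with
    | nil => simp at hk
    | cons x t => simp [List.isPrefixOf]
  | succ j ih =>
    rw [PySem.Chars.rfind.go, PySem.Chars.rfind.go]
    rw [List.drop_append_of_le_length (by omega)]
    have hne : List.drop (j + 1) cs ≠ [] := by
      intro h
      have := List.length_drop (l := cs) (i := j + 1)
      rw [h] at this
      simp at this; omega
    obtain ⟨x, t, hxt⟩ := List.exists_cons_of_ne_nil hne
    rw [hxt]
    rw [ih (by omega)]
    simp [List.isPrefixOf]

theorem pv_rfind_snoc (cs : List Char) (c d : Char) :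
    PySem.Chars.rfind (cs ++ [c]) [d] =
      if d == c then (cs.length : Int) else PySem.Chars.rfind cs [d] := by
  unfold PySem.Chars.rfind
  rw [List.length_append]
  simp only [List.length_cons, List.length_nil, Nat.zero_add]
  rw [PySem.Chars.rfind.go]
  have h1 : List.drop (cs.length + 1) (cs ++ [c]) = [] :=
    List.drop_eq_nil_of_le (by simp)
  rw [h1]
  simp only [List.isPrefixOf, Bool.false_eq_true, if_false]
  cases hlen : cs.length with
  | zero =>
    have hcs : cs = [] := List.length_eq_zero_iff.mp hlen
    subst hcs
    rw [PySem.Chars.rfind.go, PySem.Chars.rfind.go]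
    simp [List.isPrefixOf]
  | succ m =>
    rw [← hlen]
    conv_lhs => rw [show cs.length = m + 1 from hlen]
    rw [PySem.Chars.rfind.go]
    rw [show m + 1 = cs.length from hlen.symm, List.drop_left]
    conv_rhs => rw [show cs.length = m + 1 from hlen, PySem.Chars.rfind.go]
    have h2 : List.drop (m + 1) cs = [] := List.drop_eq_nil_of_le (by omega)
    rw [h2]
    simp only [List.isPrefixOf, Bool.and_true, Bool.false_eq_true, if_false]
    rw [pv_go_append cs c d m (by omega)]
    rw [hlen]

-- the single forward pass of B, on the list side
theorem pv_F_snoc (cs : List Char) (c : Char) (s init : Int) :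
    (PySem.List.enumerate (cs ++ [c]) s).foldl
        (fun acc p => if PySem.Chars.isIn [p.2] ['.', '!', '?', ';'] then p.1 else acc) init =
      if PySem.Chars.isIn [c] ['.', '!', '?', ';'] then s + cs.length
      else (PySem.List.enumerate cs s).foldl
        (fun acc p => if PySem.Chars.isIn [p.2] ['.', '!', '?', ';'] then p.1 else acc) init := by
  rw [PySem.List.enumerate_append, List.foldl_append]
  simp [PySem.List.enumerate]

theorem pv_key (cs : List Char) :
    ([".", "!", "?", ";"] : List String).foldl (fun acc e =>
        let pos := PySem.Chars.rfind cs e.toList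
        if pos > acc then pos else acc) (-1) =
      (PySem.List.enumerate cs).foldl
        (fun acc p => if PySem.Chars.isIn [p.2] ['.', '!', '?', ';'] then p.1 else acc) (-1) := by
  induction cs using List.reverseRecOn with
  | nil => decide
  | append_singleton cs c ih =>
    rw [pv_F_snoc]
    simp only [List.foldl] at ih ⊢
    have hd : (".".toList : List Char) = ['.'] := rfl
    have he : ("!".toList : List Char) = ['!'] := rfl
    have hq : ("?".toList : List Char) = ['?'] := rfl
    have hs : (";".toList : List Char) = [';'] := rfl
    simp only [hd, he, hq, hs] at ih ⊢
    rw [pv_rfind_snoc, pv_rfind_snoc, pv_rfind_snoc, pv_rfind_snoc]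
    rw [pv_isIn_single]
    have b1 := pv_rfind_lt cs '.'
    have b2 := pv_rfind_lt cs '!'
    have b3 := pv_rfind_lt cs '?'
    have b4 := pv_rfind_lt cs ';'
    by_cases h1 : c = '.'
    · subst h1; simp; split_ifs <;> omega
    by_cases h2 : c = '!'
    · subst h2; simp; split_ifs <;> omega
    by_cases h3 : c = '?'
    · subst h3; simp; split_ifs <;> omega
    by_cases h4 : c = ';'
    · subst h4; simp; split_ifs <;> omega
    have hmem : (['.', '!', '?', ';'].contains c) = false := by
      simp [List.contains_eq_mem, h1, h2, h3, h4]
    rw [hmem]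
    have e1 : ('.' == c) = false := by simp [Ne.symm h1]
    have e2 : ('!' == c) = false := by simp [Ne.symm h2]
    have e3 : ('?' == c) = false := by simp [Ne.symm h3]
    have e4 : (';' == c) = false := by simp [Ne.symm h4]
    rw [e1, e2, e3, e4]
    simpa using ih

-- ===== VERDICT (by name: the statement is the Claim_ definition above) =====
theorem extract_complete_sentence_py_spec : Claim_equal_extract_complete_sentence_py := by
  intro text _
  unfold Spec_extract_complete_sentence_py extract_complete_sentence_py extract_complete_sentence_py_alt
  have h := pv_key text.toList
  simp only [PySem.Str.rfind_eq]
  rw [h]
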